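-- pv_equiv track=rewrite | github.com/Burmese-AI/mini-bookmark-telegram | parser.py | filter_empty_headings
-- ===== SOURCE A (Python) =====
-- from typing import Dict, List, Optional, Tuple
--
-- def filter_empty_headings(content: List[Dict]) -> List[Dict]:
--     """Remove empty headings from the content."""
--     filtered_content = []
--     for i, item in enumerate(content):
--         if item['tag'].startswith('h'):
--             if i == len(content) - 1 or content[i+1]['tag'].startswith('h'):
--                 continue
--         filtered_content.append(item)
--     return filtered_content
-- ===== SOURCE B (Python) =====
-- def filter_empty_headings(content):
--     """Remove empty headings from the content (backward pass with carried state)."""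
--     result = []
--     next_is_heading = True  # end of list counts as "followed by heading/end"
--     for item in reversed(content):
--         is_heading = item['tag'].startswith('h')
--         if not (is_heading and next_is_heading):
--             result.insert(0, item)
--         next_is_heading = is_heading
--     return result
-- ===== Notes on version B (the rewrite author's own statement) =====
-- stated objective: alternative
-- what changed: Replaced the forward loop with index lookahead (content[i+1]) by a single backward pass carrying a 'next item is a heading or end' boolean, prepending kept items; no indexing at all.
import Mathlib
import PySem

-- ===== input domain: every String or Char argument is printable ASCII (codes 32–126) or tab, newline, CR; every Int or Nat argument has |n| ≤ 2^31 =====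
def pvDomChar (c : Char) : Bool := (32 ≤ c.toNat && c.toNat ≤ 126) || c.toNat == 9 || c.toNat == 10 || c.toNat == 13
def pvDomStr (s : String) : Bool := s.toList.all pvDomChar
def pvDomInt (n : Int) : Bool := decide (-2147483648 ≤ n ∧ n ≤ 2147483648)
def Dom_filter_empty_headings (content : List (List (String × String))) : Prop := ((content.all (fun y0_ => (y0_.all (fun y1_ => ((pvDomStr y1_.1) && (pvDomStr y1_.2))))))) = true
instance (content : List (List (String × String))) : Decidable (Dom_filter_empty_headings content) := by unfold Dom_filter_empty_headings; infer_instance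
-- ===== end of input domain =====

-- B replaces A's forward loop with index lookahead by a backward pass carrying a boolean; alternative decomposition, same cost.

-- ===== PORT A =====
-- item['tag'] : first match in the association list (Python dicts have unique keys); Pre_ guarantees the key exists
def pvTag (item : List (String × String)) : String :=
  (((item.find? (fun p => p.1 == "tag")).map (·.2)).getD "")

def pvIsH (item : List (String × String)) : Bool :=
  PySem.Str.startswith (pvTag item) "h"

-- the for-loop over enumerate(content), as structural recursion carrying the index i
def pvGoA (content : List (List (String × String))) (i : Nat) :
    List (List (String × String)) → List (List (String × String))
  | [] => []
  | item :: rest =>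
    (if pvIsH item then
       if i == content.length - 1
           || pvIsH ((PySem.List.pyGet? content ((i : Int) + 1)).getD []) then
         []  -- continue
       else [item]
     else [item]) ++ pvGoA content (i + 1) rest

def filter_empty_headings (content : List (List (String × String))) : List (List (String × String)) :=
  pvGoA content 0 content

-- ===== PORT B =====
-- backward pass: foldr carrying (next_is_heading, result); items are prepended
def filter_empty_headings_alt (content : List (List (String × String))) : List (List (String × String)) :=
  (content.foldr
    (fun item (st : Bool × List (List (String × String))) =>
      (pvIsH item, if pvIsH item && st.1 then st.2 else item :: st.2))
    (true, [])).2

-- ===== PRECONDITION & SPEC =====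
-- A (and B) raise KeyError when some item lacks the key 'tag'; exactly those inputs are excluded.
def Pre_filter_empty_headings (content : List (List (String × String))) : Prop :=
  ∀ item ∈ content, item.any (fun p => p.1 == "tag") = true
instance (content : List (List (String × String))) : Decidable (Pre_filter_empty_headings content) := by unfold Pre_filter_empty_headings; infer_instance

def pvWitness_filter_empty_headings : (List (List (String × String))) :=
  [[("tag", "h1")], [("tag", "p")], [("tag", "h2")]]

def Spec_filter_empty_headings (content : List (List (String × String))) (out : List (List (String × String))) : Prop := out = filter_empty_headings_alt content
instance (content : List (List (String × String))) (out : List (List (String × String))) : Decidable (Spec_filter_empty_headings content out) := by unfold Spec_filter_empty_headings; infer_instance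

-- ===== CLAIM (what is proved, stated in full; the proofs are below) =====
def Claim_equal_filter_empty_headings : Prop := ∀ (content : List (List (String × String))), Dom_filter_empty_headings content → Pre_filter_empty_headings content → Spec_filter_empty_headings content (filter_empty_headings content)

-- ===== LEMMAS AND PROOFS =====

-- reference recursion both ports are reduced to
def pvNextH : List (List (String × String)) → Bool
  | [] => true
  | y :: _ => pvIsH y

def pvRec : List (List (String × String)) → List (List (String × String))
  | [] => []
  | x :: l => (if pvIsH x && pvNextH l then [] else [x]) ++ pvRec l

theorem alt_eq_rec (l : List (List (String × String))) :
    filter_empty_headings_alt l = pvRec l ∧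
    (l.foldr
      (fun item (st : Bool × List (List (String × String))) =>
        (pvIsH item, if pvIsH item && st.1 then st.2 else item :: st.2))
      (true, [])).1 = pvNextH l := by
  induction l with
  | nil => simp [filter_empty_headings_alt, pvRec, pvNextH]
  | cons x l ih =>
    obtain ⟨ih1, ih2⟩ := ih
    simp only [filter_empty_headings_alt, List.foldr_cons] at ih1 ih2 ⊢
    refine ⟨?_, by simp [pvNextH]⟩
    rw [ih2, ih1]
    cases h : (pvIsH x && pvNextH l) <;> simp [pvRec, h]

theorem goA_eq_rec (content : List (List (String × String))) :
    ∀ (rest : List (List (String × String))) (i : Nat),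
      i + rest.length = content.length → content.drop i = rest →
      pvGoA content i rest = pvRec rest := by
  intro rest
  induction rest with
  | nil => intro i _ _; simp [pvGoA, pvRec]
  | cons item rest' ih =>
    intro i hlen hdrop
    simp only [List.length_cons] at hlen
    have hlen' : (i + 1) + rest'.length = content.length := by omega
    have hdrop' : content.drop (i + 1) = rest' := by
      rw [← List.tail_drop, hdrop]; rfl
    have hget : content[(i+1)]? = rest'.head? := by
      have h0 : (content.drop (i+1))[0]? = content[(i+1)+0]? := List.getElem?_drop
      rw [hdrop'] at h0
      simpa [List.head?_eq_getElem?] using h0.symm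
    have hpy : PySem.List.pyGet? content ((i : Int) + 1) = rest'.head? := by
      have hc : ((i : Int) + 1) = ((i + 1 : Nat) : Int) := by push_cast; ring
      rw [hc, PySem.List.pyGet?_natCast, hget]
    have hrec : pvGoA content (i+1) rest' = pvRec rest' :=
      ih (i+1) hlen' hdrop'
    rw [pvGoA, pvRec, hrec, hpy]
    have hcond : (i == content.length - 1
        || pvIsH ((rest'.head?).getD [])) = pvNextH rest' := by
      cases rest' with
      | nil =>
        have hi : (i == content.length - 1) = true := by
          simp only [List.length_nil] at hlen
          have : i = content.length - 1 := by omega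
          simp [this]
        simp [hi, pvNextH]
      | cons y t =>
        have hi : (i == content.length - 1) = false := by
          simp only [List.length_cons] at hlen'
          simp only [beq_eq_false_iff_ne, ne_eq]
          omega
        simp [hi, pvNextH]
    rw [hcond]
    cases h : pvIsH item <;> cases h2 : pvNextH rest' <;> simp

-- ===== VERDICT (by name: the statement is the Claim_ definition above) =====
theorem filter_empty_headings_spec : Claim_equal_filter_empty_headings := by
  intro content _ _
  unfold Spec_filter_empty_headings filter_empty_headings
  rw [(alt_eq_rec content).1]
  exact goA_eq_rec content content 0 (by simp) (by simp)
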